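-- pv_equiv track=rewrite | github.com/sjasthi/rebus_python | main.py | one_from_given_list
-- ===== SOURCE A (Python) =====
-- def one_from_given_list(puzzle_word, many_word_list):
--     allPuzzles = []
--     wordStrings =''
--     wordStrings += f'{"".join(puzzle_word)}: '
--     #check_word1 = list(word1)
--     tempList = many_word_list.copy()
--     for letter in puzzle_word:
--         string = ''.join(str(item) for item in tempList)
--         if letter not in string:
--             wordStrings += '??(not enough words to generate)'
--             break
--         for word2 in tempList:
--             if letter in word2:
--                 wordStrings += f'{word2.index(letter)+1}/{len(word2)}({"".join(word2)})  '
--                 tempList.pop(tempList.index(word2))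
--                 break
--     allPuzzles.append(wordStrings)
--     return allPuzzles
-- ===== SOURCE B (Python) =====
-- def one_from_given_list(puzzle_word, many_word_list):
--     # Per-letter queues of word indices (ascending), built in one pass; a removed
--     # flag array + per-letter head pointers replace A's repeated joins and scans.
--     queues = {}
--     for i, w in enumerate(many_word_list):
--         seen = set()
--         for ch in w:
--             if ch not in seen:
--                 seen.add(ch)
--                 queues.setdefault(ch, []).append(i)
--     heads = {}
--     removed = [False] * len(many_word_list)
--     parts = [puzzle_word + ': ']
--     for letter in puzzle_word:
--         q = queues.get(letter, [])
--         h = heads.get(letter, 0)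
--         while h < len(q) and removed[q[h]]:
--             h += 1
--         if h == len(q):
--             parts.append('??(not enough words to generate)')
--             break
--         i = q[h]
--         heads[letter] = h + 1
--         removed[i] = True
--         w = many_word_list[i]
--         parts.append(f'{w.index(letter)+1}/{len(w)}({w})  ')
--     return [''.join(parts)]
-- ===== Notes on version B (the rewrite author's own statement) =====
-- stated objective: faster
-- what changed: Replaces A's per-letter full join of the remaining words plus linear scan and list.pop with precomputed per-letter index queues, a removed-flag array and head pointers that skip stale fronts, so each letter is served in amortized O(1).
import Mathlib
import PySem

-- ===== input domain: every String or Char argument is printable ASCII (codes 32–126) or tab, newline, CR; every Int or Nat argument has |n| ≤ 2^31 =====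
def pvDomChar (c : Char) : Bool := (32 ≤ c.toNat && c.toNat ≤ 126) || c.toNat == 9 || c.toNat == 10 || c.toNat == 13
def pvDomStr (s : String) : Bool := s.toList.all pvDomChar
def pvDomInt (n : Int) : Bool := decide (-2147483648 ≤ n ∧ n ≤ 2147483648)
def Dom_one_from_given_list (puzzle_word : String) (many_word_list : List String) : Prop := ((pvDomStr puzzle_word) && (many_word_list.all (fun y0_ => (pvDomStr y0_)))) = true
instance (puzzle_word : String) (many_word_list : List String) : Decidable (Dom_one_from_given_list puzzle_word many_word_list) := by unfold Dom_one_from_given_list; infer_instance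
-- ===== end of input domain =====

-- B replaces A's per-letter re-join + linear scan + list.pop by precomputed per-letter
-- index queues with a removed-flag array and head pointers (objective: faster; the
-- timing run measured the speed-up).

-- Both Pythons build the identical f-string piece 'idx+1/len(word)(word)  '.
def pvFmt (c : Char) (w : List Char) : List Char :=
  (PySem.Int.toStr (PySem.Chars.find w [c] + 1)).toList
    ++ '/' :: (PySem.Int.toStr (w.length : Int)).toList
    ++ '(' :: w ++ [')', ' ', ' ']

-- ===== PORT A =====
-- inner 'for word2 in tempList: if letter in word2: … break'
def pvAFind (c : Char) : List String → Option String
  | [] => none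
  | w :: rest => if PySem.Chars.isIn [c] w.toList then some w else pvAFind c rest

-- 'tempList.pop(tempList.index(word2))' (the fallbacks are unreachable: word2 ∈ tempList)
def pvARemove (temp : List String) (w : String) : List String :=
  match PySem.List.index? temp w with
  | some j =>
    match PySem.List.pop? temp (j : Int) with
    | some pr => pr.2
    | none => temp
  | none => temp

-- outer 'for letter in puzzle_word' with the two breaks
def pvALoop : List Char → List String → List Char → List Char
  | [], _, acc => acc
  | c :: rest, temp, acc =>
    let s := PySem.Chars.join [] (temp.map String.toList)
    if PySem.Chars.isIn [c] s = false then
      acc ++ "??(not enough words to generate)".toList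
    else
      match pvAFind c temp with
      | none => pvALoop rest temp acc
      | some w => pvALoop rest (pvARemove temp w) (acc ++ pvFmt c w.toList)

def one_from_given_list (puzzle_word : String) (many_word_list : List String) : List String :=
  [String.ofList (pvALoop puzzle_word.toList many_word_list (puzzle_word.toList ++ ": ".toList))]

-- ===== PORT B =====
-- 'for ch in w: if ch not in seen: seen.add(ch); queues.setdefault(ch, []).append(i)'
def pvAddWord (d : PySem.Dict Char (List Nat)) (p : String × Nat) : PySem.Dict Char (List Nat) :=
  (p.1.toList.foldl
    (fun st ch =>
      if PySem.Set.contains st.1 ch then st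
      else (PySem.Set.add st.1 ch, st.2.modify ch [] (· ++ [p.2])))
    ((PySem.Set.empty : PySem.Set Char), d)).2

def pvBuildQueues (ws : List String) : PySem.Dict Char (List Nat) :=
  ws.zipIdx.foldl pvAddWord PySem.Dict.empty

-- 'while h < len(q) and removed[q[h]]: h += 1'
def pvAdvance (removed : List Bool) (q : List Nat) (h : Nat) : Nat :=
  if hlt : h < q.length then
    if removed.getD (q.getD h 0) false then pvAdvance removed q (h + 1) else h
  else h
termination_by q.length - h

-- 'for letter in puzzle_word' over the queues / heads / removed state
def pvBLoop (ws : List String) (queues : PySem.Dict Char (List Nat)) :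
    List Char → PySem.Dict Char Nat → List Bool → List Char → List Char
  | [], _, _, acc => acc
  | c :: rest, heads, removed, acc =>
    let q := queues.getD c []
    let h := pvAdvance removed q (heads.getD c 0)
    if h = q.length then
      acc ++ "??(not enough words to generate)".toList
    else
      let i := q.getD h 0
      pvBLoop ws queues rest (heads.insert c (h + 1)) (removed.set i true)
        (acc ++ pvFmt c (ws.getD i "").toList)

def one_from_given_list_alt (puzzle_word : String) (many_word_list : List String) : List String :=
  [String.ofList (pvBLoop many_word_list (pvBuildQueues many_word_list) puzzle_word.toList
      PySem.Dict.empty (List.replicate many_word_list.length false)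
      (puzzle_word.toList ++ ": ".toList))]

-- ===== PRECONDITION & SPEC =====
def Spec_one_from_given_list (puzzle_word : String) (many_word_list : List String) (out : List String) : Prop := out = one_from_given_list_alt puzzle_word many_word_list
instance (puzzle_word : String) (many_word_list : List String) (out : List String) : Decidable (Spec_one_from_given_list puzzle_word many_word_list out) := by unfold Spec_one_from_given_list; infer_instance

-- ===== CLAIM (what is proved, stated in full; the proofs are below) =====
def Claim_equal_one_from_given_list : Prop := ∀ (puzzle_word : String) (many_word_list : List String), Dom_one_from_given_list puzzle_word many_word_list → Spec_one_from_given_list puzzle_word many_word_list (one_from_given_list puzzle_word many_word_list)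

-- ===== LEMMAS AND PROOFS =====

theorem pvIsIn_singleton (c : Char) (s : List Char) :
    PySem.Chars.isIn [c] s = s.contains c := by
  by_cases h : c ∈ s
  · obtain ⟨l1, l2, rfl⟩ := List.append_of_mem h
    have hi : [c] <:+: l1 ++ c :: l2 := ⟨l1, l2, by simp⟩
    simp [(PySem.Chars.isIn_iff_infix _ _).mpr hi, h]
  · have hi : ¬ [c] <:+: s := fun hi => h (by simpa using hi.sublist)
    simp [(PySem.Chars.isIn_eq_false_iff _ _).mpr hi, h]

theorem pvJoin_nil_flatten (parts : List (List Char)) :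
    PySem.Chars.join [] parts = parts.flatten := by
  induction parts with
  | nil => simp [PySem.Chars.join_nil]
  | cons p t ih =>
    cases t with
    | nil => simp [PySem.Chars.join_singleton]
    | cons q r => rw [PySem.Chars.join_cons_cons]; simp_all

theorem pvAFind_eq_find? (c : Char) (l : List String) :
    pvAFind c l = l.find? (fun w => w.toList.contains c) := by
  induction l with
  | nil => rfl
  | cons w t ih => simp [pvAFind, List.find?_cons, pvIsIn_singleton]; split <;> simp_all

theorem pvAdvance_le_length (removed : List Bool) (q : List Nat) (h : Nat)
    (hh : h ≤ q.length) : pvAdvance removed q h ≤ q.length := by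
  fun_induction pvAdvance with
  | _ => omega

theorem pvAdvance_prefix (removed : List Bool) (q : List Nat) (h : Nat) :
    ∀ j, h ≤ j → j < pvAdvance removed q h → removed.getD (q.getD j 0) false = true := by
  fun_induction pvAdvance with
  | case1 h hlt hrem ih =>
    intro j hj1 hj2
    rcases Nat.eq_or_lt_of_le hj1 with rfl | hlt'
    · exact hrem
    · exact ih j hlt' hj2
  | case2 => omega
  | case3 => omega

theorem pvAdvance_stop (removed : List Bool) (q : List Nat) (h : Nat)
    (hlt : pvAdvance removed q h < q.length) :
    removed.getD (q.getD (pvAdvance removed q h) 0) false = false := by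
  fun_induction pvAdvance with
  | case1 h hlt' hrem ih => exact ih hlt
  | case2 h hlt' hrem => simpa using hrem
  | case3 h hlt' => omega

theorem pvAddChars (i : Nat) (l : List Char) (s : PySem.Set Char)
    (d : PySem.Dict Char (List Nat)) (c : Char) :
    ((l.foldl (fun st ch =>
        if PySem.Set.contains st.1 ch then st
        else (PySem.Set.add st.1 ch, st.2.modify ch [] (· ++ [i]))) (s, d)).2).getD c []
    = d.getD c [] ++ (if c ∈ l ∧ c ∉ s then [i] else []) := by
  induction l generalizing s d with
  | nil => simp
  | cons a t ih =>
    simp only [List.foldl_cons]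
    by_cases ha : PySem.Set.contains s a = true
    · rw [if_pos ha, ih]
      by_cases hc : c = a
      · subst hc
        have : c ∈ s := by simpa [PySem.Set.contains] using ha
        simp [this]
      · simp [hc]
    · rw [if_neg ha, ih]
      have ha' : a ∉ s := by simpa [PySem.Set.contains] using ha
      by_cases hc : c = a
      · subst hc
        rw [PySem.Dict.getD_modify_self]
        simp [ha']
      · rw [PySem.Dict.getD_modify_of_ne _ _ _ hc]
        simp [PySem.Set.mem_add, hc]

theorem pvAddWord_fold (ps : List (String × Nat)) (d : PySem.Dict Char (List Nat)) (c : Char) :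
    (ps.foldl pvAddWord d).getD c []
    = d.getD c [] ++ (ps.filter (fun p => p.1.toList.contains c)).map (·.2) := by
  induction ps generalizing d with
  | nil => simp
  | cons p t ih =>
    simp only [List.foldl_cons, ih]
    rw [show (pvAddWord d p).getD c [] = d.getD c [] ++ (if c ∈ p.1.toList ∧ c ∉ (PySem.Set.empty : PySem.Set Char) then [p.2] else []) from pvAddChars p.2 p.1.toList _ d c]
    by_cases hc : c ∈ p.1.toList <;> simp [hc]

theorem pvZipIdx_filter (ws : List String) (c : Char) : ∀ (k : Nat),
    ((ws.zipIdx k).filter (fun p => p.1.toList.contains c)).map (·.2)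
    = (List.range' k ws.length).filter (fun i => ((ws.getD (i - k) "").toList.contains c)) := by
  induction ws with
  | nil => simp
  | cons w t ih =>
    intro k
    have htail : (List.range' (k+1) t.length).filter
          (fun i => (((w :: t).getD (i - k) "").toList.contains c))
        = (List.range' (k+1) t.length).filter
          (fun i => ((t.getD (i - (k+1)) "").toList.contains c)) := by
      refine List.filter_congr (fun i hi => ?_)
      have h1 : k + 1 ≤ i := (List.mem_range'_1.mp hi).1
      have h2 : i - k = (i - (k+1)) + 1 := by omega
      simp [h2]
    simp only [List.zipIdx_cons, List.length_cons, List.range'_succ, List.filter_cons]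
    have hk : (w :: t).getD (k - k) "" = w := by simp
    rw [hk]
    by_cases hw : w.toList.contains c = true
    · rw [if_pos hw, if_pos hw, List.map_cons, htail, ih (k+1)]
    · rw [if_neg hw, if_neg hw, htail, ih (k+1)]

def pvQ (ws : List String) (c : Char) : List Nat :=
  (List.range ws.length).filter (fun i => (ws.getD i "").toList.contains c)

theorem pvBuildQueues_getD (ws : List String) (c : Char) :
    (pvBuildQueues ws).getD c [] = pvQ ws c := by
  unfold pvBuildQueues pvQ
  rw [pvAddWord_fold]
  simp only [PySem.Dict.getD_empty, List.nil_append]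
  rw [show ws.zipIdx = ws.zipIdx 0 from rfl, pvZipIdx_filter ws c 0, List.range_eq_range']
  exact List.filter_congr (fun i _ => by simp)

theorem pvEraseIdx_mid (l1 l2 : List String) (a : String) :
    (l1 ++ a :: l2).eraseIdx l1.length = l1 ++ l2 := by
  induction l1 with
  | nil => simp
  | cons x t ih => simpa using ih

theorem pvFind?_filter (l : List Nat) (p q : Nat → Bool) :
    (l.filter p).find? q = l.find? (fun a => p a && q a) := by
  induction l with
  | nil => rfl
  | cons x t ih =>
    by_cases hp : p x <;> by_cases hq : q x <;>
      simp [List.filter_cons, List.find?_cons, hp, hq, ih]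

theorem pvGetD_set_self (l : List Bool) (i : Nat) (b : Bool) (h : i < l.length) :
    (l.set i b).getD i false = b := by
  simp [List.getD_eq_getElem?_getD, h]

theorem pvGetD_set_ne (l : List Bool) (i j : Nat) (b : Bool) (h : i ≠ j) :
    (l.set i b).getD j false = l.getD j false := by
  simp [List.getD_eq_getElem?_getD, h]

theorem pvFind?_of_prefix (p : Nat → Bool) (q : List Nat) :
    ∀ (h : Nat), h < q.length → (∀ j < h, p (q.getD j 0) = false) →
      p (q.getD h 0) = true → q.find? p = some (q.getD h 0) := by
  induction q with
  | nil => intro h hlt; simp at hlt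
  | cons x t ih =>
    intro h hlt hpre hp
    cases h with
    | zero => simp_all
    | succ m =>
      have hx : p x = false := by simpa using hpre 0 (Nat.succ_pos m)
      simp only [List.getD_cons_succ] at hp ⊢
      rw [List.find?_cons, hx]
      exact ih m (by simpa using hlt)
        (fun j hj => by simpa using hpre (j + 1) (by omega)) hp

def pvLive (ws : List String) (removed : List Bool) : List Nat :=
  (List.range ws.length).filter (fun i => !(removed.getD i false))

theorem pvLoop_eq (ws : List String) (queues : PySem.Dict Char (List Nat))
    (hq : ∀ c, queues.getD c [] = pvQ ws c) :
    ∀ (letters : List Char) (heads : PySem.Dict Char Nat) (removed : List Bool)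
      (acc : List Char),
      removed.length = ws.length →
      (∀ c, heads.getD c 0 ≤ (pvQ ws c).length ∧
        ∀ j < heads.getD c 0, removed.getD ((pvQ ws c).getD j 0) false = true) →
      pvALoop letters ((pvLive ws removed).map (fun i => ws.getD i "")) acc
        = pvBLoop ws queues letters heads removed acc := by
  intro letters
  induction letters with
  | nil => intro heads removed acc _ _; rfl
  | cons c rest ih =>
    intro heads removed acc hlen hheads
    have hh0 := (hheads c).1
    have hpre0 := (hheads c).2
    have hble : pvAdvance removed (pvQ ws c) (heads.getD c 0) ≤ (pvQ ws c).length :=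
      pvAdvance_le_length removed (pvQ ws c) (heads.getD c 0) hh0
    have hprefix : ∀ j < pvAdvance removed (pvQ ws c) (heads.getD c 0),
        removed.getD ((pvQ ws c).getD j 0) false = true := by
      intro j hj
      by_cases hj0 : j < heads.getD c 0
      · exact hpre0 j hj0
      · exact pvAdvance_prefix removed (pvQ ws c) (heads.getD c 0) j (by omega) hj
    have hqmem : ∀ i, i ∈ pvQ ws c ↔ (i < ws.length ∧ c ∈ (ws.getD i "").toList) := by
      intro i; simp [pvQ, List.mem_filter, List.mem_range]
    have hLmem : ∀ i, i ∈ pvLive ws removed ↔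
        (i < ws.length ∧ removed.getD i false = false) := by
      intro i; simp [pvLive, List.mem_filter, List.mem_range]
    by_cases hstop : pvAdvance removed (pvQ ws c) (heads.getD c 0) = (pvQ ws c).length
    · -- no live word contains c: both sides emit '??' and stop
      have hnomem : c ∉ (((pvLive ws removed).map (fun i => ws.getD i "")).map String.toList).flatten := by
        intro hmem
        obtain ⟨cs, hcs, hccs⟩ := List.mem_flatten.mp hmem
        obtain ⟨w, hw, rfl⟩ := List.mem_map.mp hcs
        obtain ⟨i, hiL, rfl⟩ := List.mem_map.mp hw
        have hiq : i ∈ pvQ ws c := (hqmem i).mpr ⟨((hLmem i).mp hiL).1, hccs⟩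
        obtain ⟨j, hj, hji⟩ := List.getElem_of_mem hiq
        have hrem : removed.getD ((pvQ ws c).getD j 0) false = true := hprefix j (by omega)
        rw [List.getD_eq_getElem _ 0 hj, hji, ((hLmem i).mp hiL).2] at hrem
        exact Bool.false_ne_true hrem
      have hjoin : PySem.Chars.isIn [c]
          (PySem.Chars.join [] (((pvLive ws removed).map (fun i => ws.getD i "")).map String.toList)) = false := by
        rw [pvIsIn_singleton, pvJoin_nil_flatten]
        simpa using hnomem
      simp only [pvALoop, pvBLoop, hq c]
      rw [if_pos hjoin, if_pos hstop]
    · have hlt : pvAdvance removed (pvQ ws c) (heads.getD c 0) < (pvQ ws c).length :=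
        Nat.lt_of_le_of_ne hble hstop
      have hi0mem : (pvQ ws c).getD (pvAdvance removed (pvQ ws c) (heads.getD c 0)) 0 ∈ pvQ ws c := by
        rw [List.getD_eq_getElem _ 0 hlt]; exact List.getElem_mem _
      generalize hi0 : (pvQ ws c).getD (pvAdvance removed (pvQ ws c) (heads.getD c 0)) 0 = i0 at *
      have hi0n : i0 < ws.length := ((hqmem i0).mp hi0mem).1
      have hi0c : c ∈ (ws.getD i0 "").toList := ((hqmem i0).mp hi0mem).2
      have hi0live : removed.getD i0 false = false := by
        rw [← hi0]; exact pvAdvance_stop removed (pvQ ws c) (heads.getD c 0) hlt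
      have hi0L : i0 ∈ pvLive ws removed := (hLmem i0).mpr ⟨hi0n, hi0live⟩
      -- both sides pick i0: first live index whose word contains c
      have hfq : (pvQ ws c).find? (fun i => !removed.getD i false) = some i0 := by
        rw [← hi0]
        refine pvFind?_of_prefix _ (pvQ ws c) _ hlt
          (fun j hj => ?_) ?_
        · simp only [Bool.not_eq_false']
          exact hprefix j hj
        · rw [hi0]
          simp only [Bool.not_eq_true']
          exact hi0live
      have hfL : (pvLive ws removed).find? (fun i => (ws.getD i "").toList.contains c)
          = some i0 := by
        show ((List.range ws.length).filter (fun i => !(removed.getD i false))).find?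
          (fun i => (ws.getD i "").toList.contains c) = some i0
        rw [pvFind?_filter,
          show (fun a => (!removed.getD a false) && (ws.getD a "").toList.contains c)
            = (fun a => ((ws.getD a "").toList.contains c) && (!removed.getD a false))
            from funext (fun a => Bool.and_comm _ _),
          ← pvFind?_filter]
        exact hfq
      have hAfind : pvAFind c ((pvLive ws removed).map (fun i => ws.getD i ""))
          = some (ws.getD i0 "") := by
        rw [pvAFind_eq_find?, List.find?_map,
          show ((fun w : String => w.toList.contains c) ∘ (fun i => ws.getD i ""))
            = (fun i => (ws.getD i "").toList.contains c) from rfl, hfL]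
        rfl
      obtain ⟨hpci0, L1, L2, hLdec, hL1⟩ := List.find?_eq_some_iff_append.mp hfL
      have hjoinT : PySem.Chars.isIn [c]
          (PySem.Chars.join [] (((pvLive ws removed).map (fun i => ws.getD i "")).map String.toList)) = true := by
        rw [pvIsIn_singleton, pvJoin_nil_flatten]
        have : c ∈ (((pvLive ws removed).map (fun i => ws.getD i "")).map String.toList).flatten :=
          List.mem_flatten.mpr ⟨(ws.getD i0 "").toList,
            List.mem_map.mpr ⟨ws.getD i0 "", List.mem_map.mpr ⟨i0, hi0L, rfl⟩, rfl⟩, hi0c⟩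
        simpa using this
      -- A removes exactly the element at i0's position in the live list
      have hnotin : ws.getD i0 "" ∉ L1.map (fun i => ws.getD i "") := by
        intro hmem
        obtain ⟨x, hx, hfx⟩ := List.mem_map.mp hmem
        have hxne := hL1 x hx
        rw [show (ws.getD x "").toList.contains c = true by rw [hfx]; simpa using hi0c] at hxne
        simp at hxne
      have hidx : PySem.List.index? ((pvLive ws removed).map (fun i => ws.getD i ""))
          (ws.getD i0 "") = some (L1.map (fun i => ws.getD i "")).length :=
        (PySem.List.index?_eq_some_iff _ _ _).mpr
          ⟨L1.map (fun i => ws.getD i ""), L2.map (fun i => ws.getD i ""),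
            by rw [hLdec]; simp, rfl, hnotin⟩
      have hpoplen : (L1.map (fun i => ws.getD i "")).length
          < ((pvLive ws removed).map (fun i => ws.getD i "")).length := by
        rw [hLdec]; simp
      have herase : ((pvLive ws removed).map (fun i => ws.getD i "")).eraseIdx
          (L1.map (fun i => ws.getD i "")).length
          = L1.map (fun i => ws.getD i "") ++ L2.map (fun i => ws.getD i "") := by
        have h0 := pvEraseIdx_mid (L1.map (fun i => ws.getD i ""))
          (L2.map (fun i => ws.getD i "")) (ws.getD i0 "")
        rw [hLdec, List.map_append, List.map_cons]
        exact h0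
      have hremove : pvARemove ((pvLive ws removed).map (fun i => ws.getD i ""))
          (ws.getD i0 "") = L1.map (fun i => ws.getD i "") ++ L2.map (fun i => ws.getD i "") := by
        simp only [pvARemove, hidx, PySem.List.pop?_natCast _ _ hpoplen]
        exact herase
      -- the new live list
      have hLnodup : (pvLive ws removed).Nodup := (List.nodup_range).filter _
      have hi0notL1 : i0 ∉ L1 := by
        rw [hLdec] at hLnodup
        intro hx
        have hd := (List.nodup_append.mp hLnodup).2.2
        exact hd i0 hx i0 (List.mem_cons_self ..) rfl
      have hliveSet : pvLive ws (removed.set i0 true) = L1 ++ L2 := by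
        show (List.range ws.length).filter (fun i => !(removed.set i0 true).getD i false) = _
        have hstep : (List.range ws.length).filter (fun i => !(removed.set i0 true).getD i false)
            = (List.range ws.length).filter (fun i => (i != i0) && !(removed.getD i false)) := by
          refine List.filter_congr (fun i _ => ?_)
          by_cases hii : i = i0
          · subst hii; rw [pvGetD_set_self removed i true (by omega)]; simp
          · rw [pvGetD_set_ne removed i0 i true (fun hh => hii hh.symm)]; simp [hii]
        rw [hstep, ← List.filter_filter,
          show (List.range ws.length).filter (fun i => !(removed.getD i false)) = pvLive ws removed from rfl,
          ← List.Nodup.erase_eq_filter hLnodup i0, hLdec,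
          List.erase_append_right _ hi0notL1]
        simp
      -- invariant for the recursive call
      have hmono : ∀ k, removed.getD k false = true → (removed.set i0 true).getD k false = true := by
        intro k hk
        by_cases hki : i0 = k
        · subst hki; exact pvGetD_set_self removed i0 true (by omega)
        · rw [pvGetD_set_ne removed i0 k true hki]; exact hk
      have hheads' : ∀ c', (heads.insert c (pvAdvance removed (pvQ ws c) (heads.getD c 0) + 1)).getD c' 0
            ≤ (pvQ ws c').length ∧
          ∀ j < (heads.insert c (pvAdvance removed (pvQ ws c) (heads.getD c 0) + 1)).getD c' 0,
            (removed.set i0 true).getD ((pvQ ws c').getD j 0) false = true := by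
        intro c'
        rw [PySem.Dict.getD_insert]
        by_cases hcc : c' = c
        · subst hcc
          rw [if_pos rfl]
          refine ⟨by omega, fun j hj => ?_⟩
          by_cases hjh : j < pvAdvance removed (pvQ ws c') (heads.getD c' 0)
          · exact hmono _ (hprefix j hjh)
          · have hje : j = pvAdvance removed (pvQ ws c') (heads.getD c' 0) := by omega
            subst hje
            rw [hi0]
            exact pvGetD_set_self removed i0 true (by omega)
        · rw [if_neg hcc]
          exact ⟨(hheads c').1, fun j hj => hmono _ ((hheads c').2 j hj)⟩
      -- assemble
      have hcondA : ¬ (PySem.Chars.isIn [c]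
          (PySem.Chars.join [] (((pvLive ws removed).map (fun i => ws.getD i "")).map String.toList)) = false) := by
        rw [hjoinT]; simp
      simp only [pvALoop, pvBLoop, hq c]
      rw [if_neg hcondA, if_neg hstop, hAfind]
      simp only [hi0, hremove]
      rw [show L1.map (fun i => ws.getD i "") ++ L2.map (fun i => ws.getD i "")
          = (pvLive ws (removed.set i0 true)).map (fun i => ws.getD i "") from by
        rw [hliveSet, List.map_append]]
      exact ih _ _ _ (by rw [List.length_set]; exact hlen) hheads'

theorem pvInit (ws : List String) :
    (pvLive ws (List.replicate ws.length false)).map (fun i => ws.getD i "") = ws := by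
  have h1 : pvLive ws (List.replicate ws.length false) = List.range ws.length := by
    refine List.filter_eq_self.mpr (fun a ha => ?_)
    simp [List.getD_eq_getElem?_getD, List.mem_range.mp ha]
  rw [h1]
  refine List.ext_getElem (by simp) (fun i h1 h2 => ?_)
  simp [List.getElem?_eq_getElem h2]

-- ===== VERDICT (by name: the statement is the Claim_ definition above) =====
theorem one_from_given_list_spec : Claim_equal_one_from_given_list := by
  intro pw ws _
  unfold Spec_one_from_given_list one_from_given_list one_from_given_list_alt
  have h := pvLoop_eq ws (pvBuildQueues ws) (pvBuildQueues_getD ws) pw.toList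
    PySem.Dict.empty (List.replicate ws.length false) (pw.toList ++ ": ".toList)
    (by simp)
    (fun c => by
      rw [PySem.Dict.getD_empty]
      exact ⟨Nat.zero_le _, fun j hj => absurd hj (by omega)⟩)
  rw [pvInit ws] at h
  rw [h]
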